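-- pv_equiv track=rewrite | github.com/AmanullahStudies/Pf_Lab_2025_june | Roll_No_06_Amanullah/Dictionaries/code.py | count_special_characters
-- ===== SOURCE A (Python) =====
-- def count_special_characters(text):
--     special_char_count = 0
--     unique_special_chars = set()
--     special_char_list = []
--     for char in text:
--         if not (
--             ("A" <= char <= "Z")
--             or ("a" <= char <= "z")
--             or ("0" <= char <= "9")
--             or char in (" ", "\n", "\t")
--         ):
--             special_char_count += 1
--             unique_special_chars.add(char)
--             special_char_list.append(char)
--     return special_char_count, sorted(unique_special_chars), special_char_list
-- ===== SOURCE B (Python) =====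
-- def _is_special(ch):
--     return not ("A" <= ch <= "Z" or "a" <= ch <= "z" or "0" <= ch <= "9"
--                 or ch in (" ", "\n", "\t"))
--
--
-- def count_special_characters(text):
--     # Histogram first: build a character-frequency dict in one pass, classify
--     # each DISTINCT character once, then reduce: total from the counts of the
--     # special keys, uniques by sorting them, and the ordered list by set
--     # membership (no re-classification per occurrence).
--     counts = {}
--     for ch in text:
--         counts[ch] = counts.get(ch, 0) + 1
--     specials = {ch for ch in counts if _is_special(ch)}
--     total = sum(v for ch, v in counts.items() if ch in specials)
--     ordered = [ch for ch in text if ch in specials]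
--     return total, sorted(specials), ordered
-- ===== Notes on version B (the rewrite author's own statement) =====
-- stated objective: alternative
-- what changed: A fuses count/set/list accumulation into one classifying loop; B first builds a character-frequency dictionary, classifies only the distinct characters once, and then derives the total by summing the counts of special keys, the uniques by sorting that key set, and the ordered list by membership in it.
import Mathlib
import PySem

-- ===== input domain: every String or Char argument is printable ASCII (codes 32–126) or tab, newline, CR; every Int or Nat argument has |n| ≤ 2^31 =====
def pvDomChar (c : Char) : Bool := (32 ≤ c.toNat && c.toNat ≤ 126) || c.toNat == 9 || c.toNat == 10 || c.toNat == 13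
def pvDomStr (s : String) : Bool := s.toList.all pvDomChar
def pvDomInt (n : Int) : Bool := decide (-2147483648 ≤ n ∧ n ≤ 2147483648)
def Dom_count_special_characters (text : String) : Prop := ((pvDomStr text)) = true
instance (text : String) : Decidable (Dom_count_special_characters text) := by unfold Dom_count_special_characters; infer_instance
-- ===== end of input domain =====

-- B replaces A's fused classifying loop with a character-frequency dict: classify distinct chars once, then derive total/uniques/list from it; alternative decomposition, same behaviour.


-- ===== PORT A =====
-- A-side: one step of A's fused loop over (count, unique set, list); the condition is A's inline 'not (… or … or …)'
def pvStepA (st : Int × PySem.Set Char × List Char) (c : Char) :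
    Int × PySem.Set Char × List Char :=
  if !(('A' ≤ c && c ≤ 'Z') || ('a' ≤ c && c ≤ 'z') || ('0' ≤ c && c ≤ '9')
       || [' ', '\n', '\t'].contains c)
  then (st.1 + 1, PySem.Set.add st.2.1 c, st.2.2 ++ [c]) else st

def count_special_characters (text : String) : Int × List String × List String :=
  let st := text.toList.foldl pvStepA ((0 : Int), PySem.Set.empty, ([] : List Char))
  (st.1,
   (PySem.List.sorted st.2.1 (fun x => x) false).map (fun c => String.ofList [c]),
   st.2.2.map (fun c => String.ofList [c]))

-- ===== PORT B =====
-- B-side classification predicate (_is_special)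
def pvIsSpecialB (c : Char) : Bool :=
  !(('A' ≤ c && c ≤ 'Z') || ('a' ≤ c && c ≤ 'z') || ('0' ≤ c && c ≤ '9')
    || [' ', '\n', '\t'].contains c)

def count_special_characters_alt (text : String) : Int × List String × List String :=
  let counts := text.toList.foldl
    (fun d ch => d.insert ch (d.getD ch 0 + 1)) (PySem.Dict.empty : PySem.Dict Char Int)
  let specials : PySem.Set Char :=
    PySem.Set.ofList ((PySem.Dict.keys counts).filter pvIsSpecialB)
  let total : Int :=
    ((counts.items.filter (fun p => PySem.Set.contains specials p.1)).map (fun p => p.2)).sum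
  let ordered := text.toList.filter (fun ch => PySem.Set.contains specials ch)
  (total,
   (PySem.List.sorted specials (fun x => x) false).map (fun c => String.ofList [c]),
   ordered.map (fun c => String.ofList [c]))

-- ===== PRECONDITION & SPEC =====
def Spec_count_special_characters (text : String) (out : Int × List String × List String) : Prop := out = count_special_characters_alt text
instance (text : String) (out : Int × List String × List String) : Decidable (Spec_count_special_characters text out) := by unfold Spec_count_special_characters; infer_instance

-- ===== CLAIM =====
def Claim_equal_count_special_characters : Prop := ∀ (text : String), Dom_count_special_characters text → Spec_count_special_characters text (count_special_characters text)

-- ===== LEMMAS AND PROOFS =====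

-- A's fused loop computes exactly (count + |filter|, set folded over filter, list ++ filter)
theorem pvLoopA_eq (cs : List Char) (n : Int) (s : PySem.Set Char) (l : List Char) :
    cs.foldl pvStepA (n, s, l) =
      (n + ((cs.filter pvIsSpecialB).length : Int),
       (cs.filter pvIsSpecialB).foldl PySem.Set.add s,
       l ++ cs.filter pvIsSpecialB) := by
  induction cs generalizing n s l with
  | nil => simp
  | cons c cs ih =>
    by_cases h : pvIsSpecialB c
    · have hstep : pvStepA (n, s, l) c = (n + 1, s.add c, l ++ [c]) := by
        have hh : (!(('A' ≤ c && c ≤ 'Z') || ('a' ≤ c && c ≤ 'z') || ('0' ≤ c && c ≤ '9')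
            || [' ', '\n', '\t'].contains c)) = true := h
        unfold pvStepA; rw [hh]; simp
      rw [List.foldl_cons, hstep, ih, List.filter_cons_of_pos h]
      simp [List.append_assoc, Prod.ext_iff]
      omega
    · have hstep : pvStepA (n, s, l) c = (n, s, l) := by
        have hh : (!(('A' ≤ c && c ≤ 'Z') || ('a' ≤ c && c ≤ 'z') || ('0' ≤ c && c ≤ '9')
            || [' ', '\n', '\t'].contains c)) = false := by
          exact Bool.eq_false_iff.mpr (fun hc => h hc)
        unfold pvStepA; rw [hh]; simp
      rw [List.foldl_cons, hstep, ih, List.filter_cons_of_neg (by simpa using h)]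

-- B's 'specials' membership test agrees with A's classification on characters of the text
theorem pvContainsSpecials (cs : List Char) (c : Char) :
    PySem.Set.contains (PySem.Set.ofList ((PySem.Dict.keys (PySem.Dict.counter cs)).filter pvIsSpecialB)) c
      = (decide (c ∈ cs) && pvIsSpecialB c) := by
  simp [PySem.Set.contains, PySem.Dict.keys_counter, PySem.Set.mem_ofList, List.mem_filter]

-- a Nodup list S with the same members as F: summing F's multiplicities over S gives |F|
theorem pvSumCount (S F : List Char) (hnd : S.Nodup) (hmem : ∀ a, a ∈ S ↔ a ∈ F) :
    (S.map (fun k => F.count k)).sum = F.length := by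
  have h1 : S.toFinset = F.toFinset := by ext a; simp [List.mem_toFinset, hmem a]
  have h2 := List.sum_toFinset (f := fun k => F.count k) (l := S) hnd
  rw [← h2, h1]; exact List.sum_toFinset_count_eq_length F

-- B's ordered list (membership filter) is A's classification filter
theorem pvFilterEq (cs : List Char) :
    cs.filter (fun ch => PySem.Set.contains (PySem.Set.ofList ((PySem.Dict.keys (PySem.Dict.counter cs)).filter pvIsSpecialB)) ch)
      = cs.filter pvIsSpecialB := by
  apply List.filter_congr
  intro c hc
  rw [pvContainsSpecials]
  simp [hc]

-- B's sorted uniques (from the dict's keys) = A's sorted uniques (from the running set)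
theorem pvSortedEq (cs : List Char) :
    PySem.List.sorted (PySem.Set.ofList ((PySem.Dict.keys (PySem.Dict.counter cs)).filter pvIsSpecialB)) (fun x => x) false
      = PySem.List.sorted (PySem.Set.ofList (cs.filter pvIsSpecialB)) (fun x => x) false := by
  rw [PySem.List.sorted_id_eq_sorted_id_iff_perm]
  apply (List.perm_ext_iff_of_nodup (PySem.Set.nodup_ofList _) (PySem.Set.nodup_ofList _)).mpr
  intro a
  simp [PySem.Set.mem_ofList, List.mem_filter, PySem.Dict.keys_counter]

-- B's total (sum of counts of special keys) = the number of special occurrences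
theorem pvTotalEq (cs : List Char) :
    ((((PySem.Dict.counter cs : PySem.Dict Char Int).items).filter
        (fun q => PySem.Set.contains (PySem.Set.ofList ((PySem.Dict.keys (PySem.Dict.counter cs)).filter pvIsSpecialB)) q.1)).map
      (fun q => q.2)).sum = ((cs.filter pvIsSpecialB).length : Int) := by
  rw [PySem.Dict.items_counter, List.filter_map, List.map_map]
  have hfc : (PySem.Set.ofList cs).filter
      ((fun q => PySem.Set.contains (PySem.Set.ofList ((PySem.Dict.keys (PySem.Dict.counter cs)).filter pvIsSpecialB)) q.1) ∘
        (fun k => (k, (cs.count k : Int))))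
      = ((PySem.Set.ofList cs).filter pvIsSpecialB) := by
    apply List.filter_congr
    intro c hc
    have hc' : c ∈ cs := by simpa [PySem.Set.mem_ofList] using hc
    simp only [Function.comp, pvContainsSpecials]
    simp [hc']
  rw [hfc]
  have hS : ∀ a, a ∈ (PySem.Set.ofList cs).filter pvIsSpecialB ↔ a ∈ cs.filter pvIsSpecialB := by
    intro a; simp [List.mem_filter, PySem.Set.mem_ofList]
  have hcnt : (((PySem.Set.ofList cs).filter pvIsSpecialB).map ((fun q => q.2) ∘ fun k => (k, (cs.count k : Int))))
      = (((PySem.Set.ofList cs).filter pvIsSpecialB).map (fun k => ((cs.filter pvIsSpecialB).count k : Int))) := by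
    apply List.map_congr_left
    intro a ha
    have hpa : pvIsSpecialB a = true := (List.mem_filter.mp ha).2
    simp [List.count_filter, hpa]
  rw [hcnt]
  have hsum := pvSumCount ((PySem.Set.ofList cs).filter pvIsSpecialB) (cs.filter pvIsSpecialB)
    (List.Nodup.filter _ (PySem.Set.nodup_ofList _)) hS
  calc (((PySem.Set.ofList cs).filter pvIsSpecialB).map (fun k => ((cs.filter pvIsSpecialB).count k : Int))).sum
      = ((((PySem.Set.ofList cs).filter pvIsSpecialB).map (fun k => (cs.filter pvIsSpecialB).count k)).map (Nat.cast : Nat → Int)).sum := by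
        rw [List.map_map]; rfl
    _ = (((cs.filter pvIsSpecialB).length : Nat) : Int) := by
        rw [← Nat.cast_list_sum, hsum]

-- ===== VERDICT =====
theorem count_special_characters_spec : Claim_equal_count_special_characters := by
  intro text _
  unfold Spec_count_special_characters count_special_characters count_special_characters_alt
  simp only [PySem.Dict.foldl_insert_getD_add_one_eq_counter]
  rw [pvLoopA_eq, pvFilterEq, pvSortedEq, pvTotalEq]
  rw [PySem.Set.ofList_eq_foldl]
  simp [PySem.Set.empty]
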